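-- pv_equiv track=rewrite | github.com/iaseth/align | align.py | align_text_by_char
-- ===== SOURCE A (Python) =====
-- def align_one_line(line, ch, col_lengths):
-- 	columns = [col.strip() for col in line.split(ch)]
-- 	if len(columns) == len(col_lengths):
-- 		columns = [c.rjust(w) for c, w in zip(columns, col_lengths)]
-- 		return f"{ch} ".join(columns)
-- 	return line
--
-- def align_text_by_char(text, ch):
-- 	lines = [line.strip() for line in text.split("\n")]
-- 	non_empty_lines = [line for line in lines if line]
--
-- 	if non_empty_lines:
-- 		col_count = len(non_empty_lines[0].split(ch))
-- 		col_lengths = [0 for _ in range(col_count)]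
--
-- 		for line in non_empty_lines:
-- 			columns = [col.strip() for col in line.split(ch)]
-- 			if len(columns) == col_count:
-- 				for i in range(col_count):
-- 					if len(columns[i]) > col_lengths[i]:
-- 						col_lengths[i] = len(columns[i])
--
-- 	lines = [align_one_line(line, ch, col_lengths) for line in text.split("\n")]
-- 	return "\n".join(lines)
-- ===== SOURCE B (Python) =====
-- def align_text_by_char(text, ch):
-- 	lines = text.split("\n")
-- 	stripped = [l.strip() for l in lines]
-- 	non_empty = [l for l in stripped if l]
-- 	if not non_empty:
-- 		return text
-- 	col_count = len(non_empty[0].split(ch))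
-- 	pool = [r for r in ([c.strip() for c in l.split(ch)] for l in non_empty)
-- 	        if len(r) == col_count]
-- 	table = [[c.strip() for c in l.split(ch)] for l in lines]
-- 	parts = [[] for _ in lines]
-- 	for i in range(col_count):
-- 		w = max(len(r[i]) for r in pool)
-- 		for k, row in enumerate(table):
-- 			if len(row) == col_count:
-- 				parts[k].append(row[i].rjust(w))
-- 	sep = ch + " "
-- 	out = [sep.join(p) if len(row) == col_count else line
-- 	       for line, row, p in zip(lines, table, parts)]
-- 	return "\n".join(out)
-- ===== Notes on version B (the rewrite author's own statement) =====
-- stated objective: alternative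
-- what changed: B replaces A's two-phase design (first a row-major nested loop mutating a col_lengths vector, then a per-line formatting helper reading it) by a single column-major sweep: for each column index it computes that column's width and immediately appends the padded cell to each matching line's fragment list, so there is no col_lengths vector and no align_one_line helper; lines are finally assembled by joining their fragments.
import Mathlib
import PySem

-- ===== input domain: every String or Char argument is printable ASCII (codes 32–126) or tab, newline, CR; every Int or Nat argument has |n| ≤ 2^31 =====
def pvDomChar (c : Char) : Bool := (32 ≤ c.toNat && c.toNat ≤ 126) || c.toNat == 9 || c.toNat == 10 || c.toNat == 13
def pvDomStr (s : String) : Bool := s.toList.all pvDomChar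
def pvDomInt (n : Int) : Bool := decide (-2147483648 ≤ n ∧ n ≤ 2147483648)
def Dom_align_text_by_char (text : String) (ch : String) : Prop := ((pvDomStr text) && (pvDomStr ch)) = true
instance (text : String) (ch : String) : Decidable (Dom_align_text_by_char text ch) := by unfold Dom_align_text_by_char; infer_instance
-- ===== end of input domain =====

-- B aligns in a single column-major sweep (per column: compute the width, append the padded
-- cell to each matching line's fragment list, join fragments at the end) instead of A's two
-- phases (row-major width accumulator, then per-line formatting helper); on all-blank input
-- (outside Pre_) A raises NameError while B returns the text unchanged.

-- line.split(ch): Python raises ValueError for ch = "" (excluded by Pre_); total form here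
def pySplit (s : String) (sep : String) : List String := (PySem.Str.split? s sep).getD []

-- c.rjust(w): left-pad with spaces to width w (exact: Python pads with ' ', no-op if len ≥ w)
def pyRjust (s : String) (w : Int) : String :=
  String.ofList (List.replicate (w - PySem.Str.len s).toNat ' ' ++ s.toList)

-- ===== PORT A =====
def align_one_line (line : String) (ch : String) (col_lengths : List Int) : String :=
  let columns := (pySplit line ch).map PySem.Str.strip
  if columns.length = col_lengths.length then
    PySem.Str.join (ch ++ " ") ((columns.zip col_lengths).map (fun p => pyRjust p.1 p.2))
  else line

def align_text_by_char (text : String) (ch : String) : String :=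
  let lines := (pySplit text "\n").map PySem.Str.strip
  let non_empty_lines := lines.filter (fun l => l ≠ "")
  if non_empty_lines.isEmpty then ""   -- Python: col_lengths unbound → NameError (excluded by Pre_)
  else
    let col_count := (pySplit (PySem.List.pyGetD non_empty_lines 0 "") ch).length
    let col_lengths :=
      non_empty_lines.foldl (fun cl line =>
        let columns := (pySplit line ch).map PySem.Str.strip
        if columns.length = col_count then
          (PySem.List.pyRange 0 (col_count : Int) 1).foldl (fun cl i =>
            if PySem.Str.len (PySem.List.pyGetD columns i "") > PySem.List.pyGetD cl i 0 then
              PySem.List.pySetD cl i (PySem.Str.len (PySem.List.pyGetD columns i ""))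
            else cl) cl
        else cl) (List.replicate col_count 0)
    PySem.Str.join "\n" ((pySplit text "\n").map (fun line => align_one_line line ch col_lengths))

-- ===== PORT B =====
def align_text_by_char_alt (text : String) (ch : String) : String :=
  let lines := pySplit text "\n"
  let stripped := lines.map PySem.Str.strip
  let non_empty := stripped.filter (fun l => l ≠ "")
  if non_empty.isEmpty then text
  else
    let col_count := (pySplit (PySem.List.pyGetD non_empty 0 "") ch).length
    let pool := (non_empty.map (fun l => (pySplit l ch).map PySem.Str.strip)).filter
      (fun r => r.length = col_count)
    let table := lines.map (fun l => (pySplit l ch).map PySem.Str.strip)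
    let parts0 : List (List String) := lines.map (fun _ => [])
    -- Python's in-place `parts[k].append(...)` ported as a pointwise map over parts⨯table
    let parts := (PySem.List.pyRange 0 (col_count : Int) 1).foldl (fun parts i =>
      let w := (PySem.List.max? (pool.map (fun r => PySem.Str.len (PySem.List.pyGetD r i ""))) (fun x => x)).getD 0
      (parts.zip table).map (fun p =>
        if p.2.length = col_count then p.1 ++ [pyRjust (PySem.List.pyGetD p.2 i "") w] else p.1)) parts0
    let sep := ch ++ " "
    PySem.Str.join "\n" ((lines.zip (table.zip parts)).map (fun q =>
      if q.2.1.length = col_count then PySem.Str.join sep q.2.2 else q.1))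

-- ===== PRECONDITION & SPEC =====
-- Pre_ excludes exactly the inputs on which Python A raises: ch = "" (str.split with an
-- empty separator raises ValueError) and text whose lines all strip to "" (col_lengths is
-- then unbound and the final pass raises NameError).
def Pre_align_text_by_char (text : String) (ch : String) : Prop :=
  ch ≠ "" ∧ ∃ l ∈ (pySplit text "\n").map PySem.Str.strip, l ≠ ""
instance (text : String) (ch : String) : Decidable (Pre_align_text_by_char text ch) := by
  unfold Pre_align_text_by_char; infer_instance

def pvWitness_align_text_by_char : String × String := ("a,bb\nccc,d", ",")

def Spec_align_text_by_char (text : String) (ch : String) (out : String) : Prop :=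
  out = align_text_by_char_alt text ch
instance (text : String) (ch : String) (out : String) : Decidable (Spec_align_text_by_char text ch out) := by
  unfold Spec_align_text_by_char; infer_instance

-- ===== CLAIM (what is proved, stated in full; the proofs are below) =====
def Claim_equal_align_text_by_char : Prop := ∀ (text : String) (ch : String), Dom_align_text_by_char text ch → Pre_align_text_by_char text ch → Spec_align_text_by_char text ch (align_text_by_char text ch)

-- ===== LEMMAS AND PROOFS =====

theorem pv_pyRange_eq (n : Nat) :
    PySem.List.pyRange 0 (n : Int) 1 = (List.range n).map (Nat.cast : Nat → Int) := by
  rw [PySem.List.pyRange_one]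
  simp

theorem pv_innerPy_eq (n : Nat) (columns : List String) (cl : List Int) :
    (PySem.List.pyRange 0 (n : Int) 1).foldl (fun cl i =>
        if PySem.Str.len (PySem.List.pyGetD columns i "") > PySem.List.pyGetD cl i 0 then
          PySem.List.pySetD cl i (PySem.Str.len (PySem.List.pyGetD columns i ""))
        else cl) cl
      = (List.range n).foldl (fun cl i =>
          if (fun i => PySem.Str.len (columns.getD i "")) i > cl.getD i 0 then
            cl.set i ((fun i => PySem.Str.len (columns.getD i "")) i) else cl) cl := by
  rw [pv_pyRange_eq]
  generalize List.range n = ks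
  induction ks generalizing cl with
  | nil => rfl
  | cons k t ih =>
    simp only [List.map_cons, List.foldl_cons, PySem.List.pyGetD_natCast,
      PySem.List.pySetD_natCast]
    exact ih _

-- a foldl whose body skips elements failing p is a foldl over the filtered list
theorem pv_foldl_filter {α β : Type} (P : α → Prop) [DecidablePred P] (g : β → α → β) :
    ∀ (l : List α) (init : β),
      l.foldl (fun acc x => if P x then g acc x else acc) init
        = (l.filter (fun x => decide (P x))).foldl g init := by
  intro l
  induction l with
  | nil => intro init; rfl
  | cons x t ih =>
    intro init
    by_cases hpx : P x <;> simp [List.foldl_cons, hpx, ih]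

-- the inner index loop preserves the accumulator's length
theorem pv_inner_length (f : Nat → Int) (is : List Nat) (cl : List Int) :
    (is.foldl (fun cl i => if f i > cl.getD i 0 then cl.set i (f i) else cl) cl).length = cl.length := by
  induction is generalizing cl with
  | nil => rfl
  | cons i t ih =>
    rw [List.foldl_cons, ih]
    split <;> simp

-- pointwise value of one conditional update
theorem pv_step_len (f : Nat → Int) (cl : List Int) (i : Nat) :
    (if f i > cl.getD i 0 then cl.set i (f i) else cl).length = cl.length := by
  split <;> simp

theorem pv_step_getD (f : Nat → Int) (cl : List Int) (i j : Nat) (hj : j < cl.length) :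
    (if f i > cl.getD i 0 then cl.set i (f i) else cl).getD j 0 =
      if j = i then max (cl.getD j 0) (f j) else cl.getD j 0 := by
  have hget : cl.getD j 0 = cl[j] := by
    simp [List.getD_eq_getElem?_getD, List.getElem?_eq_getElem hj]
  by_cases hji : j = i
  · subst hji
    rw [if_pos rfl]
    by_cases h : f j > cl.getD j 0
    · rw [if_pos h, List.getD_eq_getElem?_getD, List.getElem?_set_self']
      simp [hj]
      exact le_of_lt (hget ▸ h)
    · rw [if_neg h]
      exact (max_eq_left (not_lt.mp h)).symm
  · rw [if_neg hji]
    split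
    · rw [List.getD_eq_getElem?_getD, List.getElem?_set_ne (fun hij => hji hij.symm)]
      rw [List.getD_eq_getElem?_getD]
    · rfl

-- pointwise value of the inner index loop
theorem pv_inner_getD (f : Nat → Int) (is : List Nat) (cl : List Int) (j : Nat) (hj : j < cl.length) :
    (is.foldl (fun cl i => if f i > cl.getD i 0 then cl.set i (f i) else cl) cl).getD j 0 =
      if j ∈ is then max (cl.getD j 0) (f j) else cl.getD j 0 := by
  induction is generalizing cl with
  | nil => simp
  | cons i t ih =>
    rw [List.foldl_cons, ih _ (by rw [pv_step_len]; exact hj),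
      pv_step_getD f cl i j hj]
    by_cases hji : j = i <;> by_cases hjt : j ∈ t <;>
      simp [hji, hjt]

-- the row-major fold of inner index loops, read at one index, is a running max over that column
theorem pv_fold_rows_getD (n : Nat) (len : List String → Nat → Int)
    (rows : List (List String)) (cl : List Int) (hcl : cl.length = n) (j : Nat) (hj : j < n) :
    (rows.foldl (fun cl r =>
        (List.range n).foldl (fun cl i => if len r i > cl.getD i 0 then cl.set i (len r i) else cl) cl) cl).getD j 0
      = rows.foldl (fun m r => max m (len r j)) (cl.getD j 0) := by
  induction rows generalizing cl with
  | nil => rfl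
  | cons r t ih =>
    simp only [List.foldl_cons]
    rw [ih _ (by rw [pv_inner_length]; exact hcl)]
    rw [pv_inner_getD (len r) (List.range n) cl j (by omega)]
    simp [List.mem_range, hj]

theorem pv_fold_rows_length (n : Nat) (len : List String → Nat → Int)
    (rows : List (List String)) (cl : List Int) :
    (rows.foldl (fun cl r =>
        (List.range n).foldl (fun cl i => if len r i > cl.getD i 0 then cl.set i (len r i) else cl) cl) cl).length
      = cl.length := by
  induction rows generalizing cl with
  | nil => rfl
  | cons r t ih => simp only [List.foldl_cons]; rw [ih, pv_inner_length]

theorem pv_len_nonneg (s : String) : 0 ≤ PySem.Str.len s := by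
  simp [PySem.Str.len_eq]

-- A's width accumulator equals the column-major max formula over the pool of matching rows
theorem pv_col_lengths_eq (ch : String) (first : String) (rest : List String) :
    (first :: rest).foldl (fun cl line =>
        let columns := (pySplit line ch).map PySem.Str.strip
        if columns.length = (pySplit first ch).length then
          (PySem.List.pyRange 0 (((pySplit first ch).length : Nat) : Int) 1).foldl (fun cl i =>
            if PySem.Str.len (PySem.List.pyGetD columns i "") > PySem.List.pyGetD cl i 0 then
              PySem.List.pySetD cl i (PySem.Str.len (PySem.List.pyGetD columns i ""))
            else cl) cl
        else cl) (List.replicate (pySplit first ch).length 0)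
      = (PySem.List.pyRange 0 (((pySplit first ch).length : Nat) : Int) 1).map (fun i =>
          (PySem.List.max? ((((first :: rest).map (fun line => (pySplit line ch).map PySem.Str.strip)).filter
              (fun cols => cols.length = (pySplit first ch).length)).map
              (fun r => PySem.Str.len (PySem.List.pyGetD r i ""))) (fun x => x)).getD 0) := by
  set n := (pySplit first ch).length with hn
  set g : String → List String := fun line => (pySplit line ch).map PySem.Str.strip with hg
  set len : List String → Nat → Int := fun r j => PySem.Str.len (r.getD j "") with hlen
  have hinner : ∀ (line : String) (cl : List Int),
      (if (g line).length = n then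
        (PySem.List.pyRange 0 (n : Int) 1).foldl (fun cl i =>
          if PySem.Str.len (PySem.List.pyGetD (g line) i "") > PySem.List.pyGetD cl i 0 then
            PySem.List.pySetD cl i (PySem.Str.len (PySem.List.pyGetD (g line) i ""))
          else cl) cl
       else cl)
      = (fun cl cols => if cols.length = n then
          (List.range n).foldl (fun cl i =>
            if len cols i > cl.getD i 0 then cl.set i (len cols i) else cl) cl
         else cl) cl (g line) := by
    intro line cl
    simp only [pv_innerPy_eq n (g line) cl, hlen]
  have hA : (first :: rest).foldl (fun cl line =>
        if (g line).length = n then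
          (PySem.List.pyRange 0 (n : Int) 1).foldl (fun cl i =>
            if PySem.Str.len (PySem.List.pyGetD (g line) i "") > PySem.List.pyGetD cl i 0 then
              PySem.List.pySetD cl i (PySem.Str.len (PySem.List.pyGetD (g line) i ""))
            else cl) cl
        else cl) (List.replicate n 0)
      = (((first :: rest).map g).filter (fun cols => decide (cols.length = n))).foldl
          (fun cl cols => if cols.length = n then
            (List.range n).foldl (fun cl i =>
              if len cols i > cl.getD i 0 then cl.set i (len cols i) else cl) cl
           else cl) (List.replicate n 0) := by
    rw [← pv_foldl_filter, List.foldl_map]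
    have hb : (fun (cl : List Int) line =>
        if (g line).length = n then
          (PySem.List.pyRange 0 (n : Int) 1).foldl (fun cl i =>
            if PySem.Str.len (PySem.List.pyGetD (g line) i "") > PySem.List.pyGetD cl i 0 then
              PySem.List.pySetD cl i (PySem.Str.len (PySem.List.pyGetD (g line) i ""))
            else cl) cl
        else cl)
      = (fun (cl : List Int) line => (fun cl cols => if cols.length = n then
          (List.range n).foldl (fun cl i =>
            if len cols i > cl.getD i 0 then cl.set i (len cols i) else cl) cl
         else cl) cl (g line)) := by
      funext cl line
      exact hinner line cl
    rw [hb]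
    congr 1
    funext x y
    by_cases h : (g y).length = n <;> simp [h]
  have hB : (((first :: rest).map g).filter (fun cols => decide (cols.length = n))).foldl
          (fun cl cols => if cols.length = n then
            (List.range n).foldl (fun cl i =>
              if len cols i > cl.getD i 0 then cl.set i (len cols i) else cl) cl
           else cl) (List.replicate n 0)
      = (PySem.List.pyRange 0 ((n : Nat) : Int) 1).map (fun i =>
          (PySem.List.max? ((((first :: rest).map g).filter
              (fun cols => decide (cols.length = n))).map
              (fun r => PySem.Str.len (PySem.List.pyGetD r i ""))) (fun x => x)).getD 0) := by
    set rows' := ((rest).map g).filter (fun cols => decide (cols.length = n)) with hrows'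
    have hpfirst : (g first).length = n := by simp [hg, hn, pySplit]
    have hrowcons : ((first :: rest).map g).filter (fun cols => decide (cols.length = n))
        = g first :: rows' := by
      simp [hpfirst]
      exact hrows'.symm
    rw [hrowcons, pv_pyRange_eq, List.map_map]
    have hmem : ∀ cols ∈ (g first :: rows'), cols.length = n := by
      intro cols hc
      rcases List.mem_cons.mp hc with h | h
      · rw [h]; exact hpfirst
      · have := List.of_mem_filter h
        simpa using this
    have hunguard : List.foldl (fun (cl : List Int) cols => if cols.length = n then
            (List.range n).foldl (fun cl i =>
              if len cols i > cl.getD i 0 then cl.set i (len cols i) else cl) cl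
           else cl) (List.replicate n 0) (g first :: rows')
        = List.foldl (fun (cl : List Int) cols =>
            (List.range n).foldl (fun cl i =>
              if len cols i > cl.getD i 0 then cl.set i (len cols i) else cl) cl)
            (List.replicate n 0) (g first :: rows') := by
      apply List.foldl_ext
      intro acc cols hc
      rw [if_pos (hmem cols hc)]
    rw [hunguard]
    apply List.ext_getElem
    · rw [pv_fold_rows_length]
      simp
    · intro j h1 h2
      have hj : j < n := by
        have := h1
        rw [pv_fold_rows_length] at this
        simpa using this
      rw [← List.getD_eq_getElem _ 0 h1]
      rw [pv_fold_rows_getD n len _ _ (by simp) j hj]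
      simp only [List.getElem_map, List.getElem_range,
        Function.comp_apply, PySem.List.pyGetD_natCast, List.map_cons,
        PySem.List.max?_id_cons, Option.getD_some, List.foldl_cons]
      have hz : (List.replicate n (0:Int)).getD j 0 = 0 := by simp
      rw [hz, max_eq_right (pv_len_nonneg _), List.foldl_map]
  exact hA.trans hB

-- zipping a pointwise-updated left list back with the same right list
theorem pv_zip_map_left {β γ : Type} (f : β → γ → β) :
    ∀ (xs : List β) (ys : List γ), xs.length = ys.length →
      (((xs.zip ys).map (fun p => f p.1 p.2)).zip ys)
        = (xs.zip ys).map (fun p => (f p.1 p.2, p.2)) := by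
  intro xs
  induction xs with
  | nil => intro ys _; rfl
  | cons x xt ih =>
    intro ys h
    cases ys with
    | nil => simp at h
    | cons y yt =>
      simp only [List.zip_cons_cons, List.map_cons]
      rw [ih yt (by simpa using h)]

-- B's column-major fold over the parts vector, read pointwise: each row accumulates independently
theorem pv_fold_zip_map {α β γ : Type} (F : α → β → γ → β) :
    ∀ (is : List α) (ps : List β) (table : List γ), ps.length = table.length →
      is.foldl (fun ps i => (ps.zip table).map (fun p => F i p.1 p.2)) ps
        = (ps.zip table).map (fun p => is.foldl (fun a i => F i a p.2) p.1) := by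
  intro is
  induction is with
  | nil =>
    intro ps table h
    simpa using (List.map_fst_zip (l₁ := ps) (l₂ := table) (le_of_eq h)).symm
  | cons i t ih =>
    intro ps table h
    simp only [List.foldl_cons]
    rw [ih _ table (by simp [h]), pv_zip_map_left, List.map_map]
    · rfl
    · exact h

-- folding "append one element" builds the map
theorem pv_foldl_append_map {α : Type} (f : α → String) :
    ∀ (is : List α) (acc : List String),
      is.foldl (fun a i => a ++ [f i]) acc = acc ++ is.map f := by
  intro is
  induction is with
  | nil => simp
  | cons i t ih => intro acc; simp [List.foldl_cons, ih]

theorem pv_zip_self_map {β γ : Type} (h : β → γ) :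
    ∀ (xs : List β), xs.zip (xs.map h) = xs.map (fun x => (x, h x)) := by
  intro xs
  induction xs with
  | nil => rfl
  | cons x t ih => simp [ih]

theorem pv_zip_map_range {β : Type} (n : Nat) (cols : List String) (v : Nat → Int)
    (f : String → Int → β) (hc : cols.length = n) :
    (cols.zip ((List.range n).map v)).map (fun p => f p.1 p.2)
      = (List.range n).map (fun j => f (cols.getD j "") (v j)) := by
  apply List.ext_getElem
  · simp [hc]
  · intro j h1 h2
    have hj : j < n := by simpa using h2
    have hjc : j < cols.length := by omega
    simp only [List.getElem_map, List.getElem_zip, List.getElem_range,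
      List.getD_eq_getElem?_getD, List.getElem?_eq_getElem hjc, Option.getD_some]

-- ===== VERDICT (by name: the statement is the Claim_ definition above) =====
theorem align_text_by_char_spec : Claim_equal_align_text_by_char := by
  intro text ch _ hpre
  unfold Spec_align_text_by_char
  obtain ⟨hch, l, hl, hlne⟩ := hpre
  have hne : (((pySplit text "\n").map PySem.Str.strip).filter (fun l => decide (l ≠ ""))) ≠ [] := by
    intro h
    have := List.filter_eq_nil_iff.mp h l hl
    simp [hlne] at this
  obtain ⟨first, rest, heq⟩ := List.exists_cons_of_ne_nil hne
  have h0 : PySem.List.pyGetD (first :: rest) (0 : Int) "" = first := by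
    simp [PySem.List.pyGetD, PySem.List.pyGet?, PySem.List.pyIdx?]
  simp only [align_text_by_char, align_text_by_char_alt, heq, h0, List.isEmpty_cons,
    Bool.false_eq_true, if_false]
  rw [pv_col_lengths_eq]
  set lines := pySplit text "\n" with hlines
  set n := (pySplit first ch).length with hn
  set cells : String → List String := fun l => (pySplit l ch).map PySem.Str.strip with hcells
  set wc : Int → Int := fun i =>
    (PySem.List.max? (List.map (fun r => PySem.Str.len (PySem.List.pyGetD r i ""))
        (List.filter (fun r => decide (r.length = n))
          (List.map cells (first :: rest)))) (fun x => x)).getD 0 with hwc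
  rw [pv_fold_zip_map
        (fun (i : Int) (a : List String) (row : List String) =>
          if row.length = n then a ++ [pyRjust (PySem.List.pyGetD row i "") (wc i)] else a)
        (PySem.List.pyRange 0 (n : Int) 1)
        (List.map (fun _ => ([] : List String)) lines)
        (List.map cells lines) (by simp)]
  rw [List.zip_map']
  rw [List.map_map]
  rw [List.zip_map']
  rw [pv_zip_self_map]
  rw [List.map_map]
  apply congrArg (PySem.Str.join "\n")
  apply List.map_congr_left
  intro line _
  simp only [Function.comp_apply]
  unfold align_one_line
  have hW : (List.map wc (PySem.List.pyRange 0 (n : Int) 1)).length = n := by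
    rw [pv_pyRange_eq]; simp
  have hraw : List.map PySem.Str.strip (pySplit line ch) = cells line := rfl
  by_cases hcl : (cells line).length = n
  · have hl1 : (List.map PySem.Str.strip (pySplit line ch)).length
        = (List.map wc (PySem.List.pyRange 0 (n : Int) 1)).length := by
      rw [hW, hraw]; exact hcl
    rw [if_pos hl1, if_pos hcl]
    have hfold : (fun (a : List String) (i : Int) =>
          if (cells line).length = n then a ++ [pyRjust (PySem.List.pyGetD (cells line) i "") (wc i)] else a)
        = (fun (a : List String) (i : Int) => a ++ [pyRjust (PySem.List.pyGetD (cells line) i "") (wc i)]) := by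
      funext a i
      rw [if_pos hcl]
    rw [hfold, pv_foldl_append_map, List.nil_append]
    apply congrArg
    rw [hraw, pv_pyRange_eq, List.map_map, List.map_map]
    have hgetD : (fun (j : Nat) => pyRjust (PySem.List.pyGetD (cells line) ((j : Nat) : Int) "") (wc (j : Nat)))
        = (fun (j : Nat) => pyRjust ((cells line).getD j "") (wc (j : Nat))) := by
      funext j
      rw [PySem.List.pyGetD_natCast]
    calc ((cells line).zip ((List.range n).map (fun j => wc (j : Nat)))).map (fun p => pyRjust p.1 p.2)
        = (List.range n).map (fun j => pyRjust ((cells line).getD j "") (wc (j : Nat))) :=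
          pv_zip_map_range n (cells line) (fun j => wc (j : Nat)) pyRjust hcl
      _ = (List.range n).map (fun j => pyRjust (PySem.List.pyGetD (cells line) ((j : Nat) : Int) "") (wc (j : Nat))) := by
          rw [hgetD]
  · have hl1 : ¬ (List.map PySem.Str.strip (pySplit line ch)).length
        = (List.map wc (PySem.List.pyRange 0 (n : Int) 1)).length := by
      rw [hW, hraw]; exact hcl
    rw [if_neg hl1, if_neg hcl]
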